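-- pv_equiv track=rewrite | github.com/yogeshwaranm-turing/amazon-agentic | TOOL/new_function_chain_analyzer.py | _pick_unused_output
-- ===== SOURCE A (Python) =====
-- from typing import Dict, List, Any, Tuple
--
-- def _pick_unused_output(outputs: List[str], used_variables: set, func_name: str) -> str:
--     """Pick the most meaningful output that hasn't been used yet"""
--     if not outputs:
--         return None
--
--     # Filter out already used outputs
--     unused_outputs = [o for o in outputs if o.lower() not in used_variables]
--     if not unused_outputs:
--         return None  # All outputs have been used
--
--     # Prefer outputs that match the function name
--     func_lower = func_name.lower()
--     for output in unused_outputs: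
--         if any(word in output.lower() for word in func_lower.split('_')):
--             return output
--
--     # Prefer non-generic outputs
--     non_generic = [o for o in unused_outputs if o.lower() not in ['result', 'data', 'output', 'response']]
--     if non_generic:
--         return non_generic[0]
--
--     # Fall back to first unused output
--     return unused_outputs[0]
-- ===== SOURCE B (Python) =====
-- def _pick_unused_output(outputs, used_variables, func_name):
--     """Pick the most meaningful output that hasn't been used yet (single-pass rank scan)."""
--     words = func_name.lower().split('_')
--     generic = {'result', 'data', 'output', 'response'}
--     best, best_rank = None, 3
--     for o in outputs:
--         low = o.lower()
--         if low in used_variables: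
--             continue
--         if any(w in low for w in words):
--             rank = 0
--         elif low not in generic:
--             rank = 1
--         else:
--             rank = 2
--         if rank < best_rank:
--             best, best_rank = o, rank
--     return best
-- ===== Notes on version B (the rewrite author's own statement) =====
-- stated objective: alternative
-- what changed: A makes three separate passes over the unused outputs (find a function-name match, then filter non-generic, then fall back to the first); B makes one pass over outputs, skipping used ones and keeping the earliest output of minimum rank (0 = matches a func_name word, 1 = non-generic, 2 = generic).
import Mathlib
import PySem

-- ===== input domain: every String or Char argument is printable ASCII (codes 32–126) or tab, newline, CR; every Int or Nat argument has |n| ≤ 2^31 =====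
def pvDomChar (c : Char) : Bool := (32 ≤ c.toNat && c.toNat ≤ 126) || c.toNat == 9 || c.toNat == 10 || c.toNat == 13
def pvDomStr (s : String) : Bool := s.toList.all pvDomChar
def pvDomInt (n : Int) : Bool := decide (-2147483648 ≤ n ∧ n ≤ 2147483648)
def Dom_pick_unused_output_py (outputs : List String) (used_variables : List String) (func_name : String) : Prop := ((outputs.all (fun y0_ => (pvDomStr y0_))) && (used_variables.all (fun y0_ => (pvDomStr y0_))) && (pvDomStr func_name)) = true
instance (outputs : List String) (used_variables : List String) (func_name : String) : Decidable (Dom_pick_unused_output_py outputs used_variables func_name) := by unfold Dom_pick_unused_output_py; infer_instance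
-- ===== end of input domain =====

-- B replaces A's three separate passes over the unused outputs (function-name scan,
-- non-generic filter, first-element fallback) by ONE pass keeping the earliest output
-- of minimum rank (0 = matches a word of func_name, 1 = non-generic, 2 = generic);
-- objective: alternative (single-pass decomposition, same result).

-- ===== PORT A =====
def pick_unused_output_py (outputs : List String) (used_variables : List String) (func_name : String) : Option String :=
  if outputs.isEmpty then none
  else
    -- unused_outputs = [o for o in outputs if o.lower() not in used_variables]
    match outputs.filter (fun o => !(used_variables.contains (PySem.Str.lower o))) with
    | [] => none
    | u :: rest =>
      -- words = func_name.lower().split('_'); split? is none only for separator "", which "_" is not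
      -- for output in unused_outputs: if any(word in output.lower() ...): return output
      match (u :: rest).find? (fun o => ((PySem.Str.split? (PySem.Str.lower func_name) "_").getD []).any (fun w => PySem.Str.isIn w (PySem.Str.lower o))) with
      | some o => some o
      | none =>
        -- non_generic = [o for o in unused_outputs if o.lower() not in [...]]
        match (u :: rest).filter (fun o => !(["result", "data", "output", "response"].contains (PySem.Str.lower o))) with
        | o :: _ => some o
        | [] => some u      -- return unused_outputs[0]

-- ===== PORT B =====
-- rank of an output: 0 if a word of func_name occurs in it, 1 if non-generic, 2 if generic
def pvRank (words : List String) (o : String) : Nat :=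
  if words.any (fun w => PySem.Str.isIn w (PySem.Str.lower o)) then 0
  else if !(["result", "data", "output", "response"].contains (PySem.Str.lower o)) then 1
  else 2

-- one iteration of B's loop: skip used outputs, keep the earliest output of minimum rank
def pvStep (used_variables : List String) (words : List String)
    (st : Option String × Nat) (o : String) : Option String × Nat :=
  if used_variables.contains (PySem.Str.lower o) then st
  else if pvRank words o < st.2 then (some o, pvRank words o) else st

def pick_unused_output_py_alt (outputs : List String) (used_variables : List String) (func_name : String) : Option String :=
  (outputs.foldl (pvStep used_variables ((PySem.Str.split? (PySem.Str.lower func_name) "_").getD [])) (none, 3)).1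

-- ===== PRECONDITION & SPEC =====
def Spec_pick_unused_output_py (outputs : List String) (used_variables : List String) (func_name : String) (out : Option String) : Prop := out = pick_unused_output_py_alt outputs used_variables func_name
instance (outputs : List String) (used_variables : List String) (func_name : String) (out : Option String) : Decidable (Spec_pick_unused_output_py outputs used_variables func_name out) := by unfold Spec_pick_unused_output_py; infer_instance

-- ===== CLAIM (what is proved, stated in full; the proofs are below) =====
def Claim_equal_pick_unused_output_py : Prop := ∀ (outputs : List String) (used_variables : List String) (func_name : String), Dom_pick_unused_output_py outputs used_variables func_name → Spec_pick_unused_output_py outputs used_variables func_name (pick_unused_output_py outputs used_variables func_name)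

-- ===== LEMMAS AND PROOFS =====

-- B's fold body without the used-variables skip
def pvCore (words : List String) (st : Option String × Nat) (o : String) : Option String × Nat :=
  if pvRank words o < st.2 then (some o, pvRank words o) else st

-- folding pvStep over outputs = folding pvCore over the unused outputs
theorem pvFold_filter (used words : List String) :
    ∀ (l : List String) (st : Option String × Nat),
      l.foldl (pvStep used words) st
        = (l.filter (fun o => !(used.contains (PySem.Str.lower o)))).foldl (pvCore words) st := by
  intro l
  induction l with
  | nil => intro st; rfl
  | cons o t ih =>
    intro st
    by_cases h : used.contains (PySem.Str.lower o) = true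
    · simp only [List.foldl_cons, List.filter_cons, pvStep, h, if_true, Bool.not_true,
        Bool.false_eq_true, if_false]
      exact ih st
    · simp only [List.foldl_cons, List.filter_cons, pvStep, Bool.eq_false_iff.mpr h,
        Bool.not_false, if_true, List.foldl_cons]
      exact ih _

-- the fold never updates once no element beats the current rank
theorem pvFold_stable (words : List String) :
    ∀ (U : List String) (b : Option String) (n : Nat),
      (∀ o ∈ U, n ≤ pvRank words o) → U.foldl (pvCore words) (b, n) = (b, n) := by
  intro U
  induction U with
  | nil => intro b n _; rfl
  | cons o t ih =>
    intro b n h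
    have h0 := h o (by simp)
    simp only [List.foldl_cons, pvCore, Nat.not_lt.mpr h0, if_false]
    exact ih b n (fun x hx => h x (by simp [hx]))

theorem pvRank_le_two (words : List String) (o : String) : pvRank words o ≤ 2 := by
  unfold pvRank; split_ifs <;> omega

theorem pvRank_eq_zero_iff (words : List String) (o : String) :
    pvRank words o = 0 ↔ words.any (fun w => PySem.Str.isIn w (PySem.Str.lower o)) = true := by
  unfold pvRank; split_ifs <;> simp_all

theorem pvRank_eq_one_iff (words : List String) (o : String)
    (h0 : pvRank words o ≠ 0) :
    pvRank words o = 1 ↔ (!(["result", "data", "output", "response"].contains (PySem.Str.lower o))) = true := by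
  unfold pvRank at *; split_ifs at * <;> simp_all

-- a rank-0 element is found: the fold returns the first one
theorem pvFold_rank0 (words : List String) :
    ∀ (U : List String) (b : Option String) (n : Nat) (m : String),
      1 ≤ n →
      U.find? (fun o => words.any (fun w => PySem.Str.isIn w (PySem.Str.lower o))) = some m →
      (U.foldl (pvCore words) (b, n)).1 = some m := by
  intro U
  induction U with
  | nil => intro b n m _ h; simp at h
  | cons o t ih =>
    intro b n m hn hf
    by_cases h0 : (words.any (fun w => PySem.Str.isIn w (PySem.Str.lower o))) = true
    · rw [List.find?_cons_of_pos (p := fun o => ((words.any (fun w => PySem.Str.isIn w (PySem.Str.lower o))))) h0] at hf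
      have hom : o = m := Option.some.inj hf
      subst hom
      have hr : pvRank words o = 0 := (pvRank_eq_zero_iff words o).mpr h0
      simp only [List.foldl_cons, pvCore, hr, if_pos (show 0 < n by omega)]
      rw [pvFold_stable words t (some o) 0 (fun x _ => Nat.zero_le _)]
    · rw [List.find?_cons_of_neg (p := fun o => ((words.any (fun w => PySem.Str.isIn w (PySem.Str.lower o))))) h0] at hf
      have hr : pvRank words o ≠ 0 := fun h => h0 ((pvRank_eq_zero_iff words o).mp h)
      simp only [List.foldl_cons, pvCore]
      split_ifs with hlt
      · exact ih (some o) (pvRank words o) m (by omega) hf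
      · exact ih b n m hn hf

-- no rank-0 element, but a rank-1 element: the fold returns the first rank-1 element
theorem pvFold_rank1 (words : List String) :
    ∀ (U : List String) (b : Option String) (n : Nat) (m : String) (rest : List String),
      2 ≤ n →
      (∀ o ∈ U, pvRank words o ≠ 0) →
      U.filter (fun o => pvRank words o = 1) = m :: rest →
      (U.foldl (pvCore words) (b, n)).1 = some m := by
  intro U
  induction U with
  | nil => intro b n m rest _ _ h; simp at h
  | cons o t ih =>
    intro b n m rest hn h0 hf
    rw [List.filter_cons] at hf
    have ho := h0 o (by simp)
    have hle := pvRank_le_two words o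
    by_cases h1 : pvRank words o = 1
    · simp only [h1, decide_true, if_true, List.cons.injEq] at hf
      obtain ⟨hm, _⟩ := hf
      subst hm
      simp only [List.foldl_cons, pvCore, h1, if_pos (show 1 < n by omega)]
      rw [pvFold_stable words t (some o) 1
        (fun x hx => by have := h0 x (by simp [hx]); omega)]
    · have h2 : pvRank words o = 2 := by omega
      simp only [h1, decide_false, Bool.false_eq_true, if_false] at hf
      simp only [List.foldl_cons, pvCore]
      split_ifs with hlt
      · rw [h2]
        exact ih (some o) 2 m rest (by omega) (fun x hx => h0 x (by simp [hx])) hf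
      · exact ih b n m rest hn (fun x hx => h0 x (by simp [hx])) hf

-- everything has rank 2: the fold from (none, 3) returns the first element
theorem pvFold_rank2 (words : List String) (u : String) (t : List String)
    (h : ∀ o ∈ u :: t, pvRank words o = 2) :
    ((u :: t).foldl (pvCore words) ((none : Option String), 3)).1 = some u := by
  have hu := h u (by simp)
  simp only [List.foldl_cons, pvCore, hu, if_pos (show (2 : Nat) < 3 by omega)]
  rw [pvFold_stable words t (some u) 2 (fun x hx => by rw [h x (by simp [hx])])]

-- ===== VERDICT (by name: the statement is the Claim_ definition above) =====
theorem pick_unused_output_py_spec : Claim_equal_pick_unused_output_py := by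
  intro outputs used_variables func_name _
  unfold Spec_pick_unused_output_py pick_unused_output_py pick_unused_output_py_alt
  set words := (PySem.Str.split? (PySem.Str.lower func_name) "_").getD [] with hwords
  rw [pvFold_filter used_variables words outputs]
  by_cases hout : outputs.isEmpty
  · simp [List.isEmpty_iff.mp hout]
  · rw [if_neg hout]
    cases hfil : outputs.filter (fun o => !(used_variables.contains (PySem.Str.lower o))) with
    | nil => simp
    | cons u rest =>
      simp only
      cases hfind : (u :: rest).find? (fun o => words.any (fun w => PySem.Str.isIn w (PySem.Str.lower o))) with
      | some m =>
        simp only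
        rw [pvFold_rank0 words (u :: rest) none 3 m (by omega) hfind]
      | none =>
        have h0 : ∀ o ∈ u :: rest, pvRank words o ≠ 0 := by
          intro o ho h
          have := List.find?_eq_none.mp hfind o ho
          exact this ((pvRank_eq_zero_iff words o).mp h)
        have hfeq : (u :: rest).filter (fun o => !(["result", "data", "output", "response"].contains (PySem.Str.lower o)))
            = (u :: rest).filter (fun o => pvRank words o = 1) := by
          apply List.filter_congr
          intro x hx
          have hiff := pvRank_eq_one_iff words x (h0 x hx)
          by_cases h1 : pvRank words x = 1
          · rw [hiff.mp h1, h1]; rfl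
          · have hb : (!(["result", "data", "output", "response"].contains (PySem.Str.lower x))) = false := by
              cases hcb : (!(["result", "data", "output", "response"].contains (PySem.Str.lower x))) with
              | true => exact absurd (hiff.mpr hcb) h1
              | false => rfl
            rw [hb]
            simp [h1]
        simp only [hfeq]
        cases hng : (u :: rest).filter (fun o => pvRank words o = 1) with
        | cons m rest' =>
          simp only
          rw [pvFold_rank1 words (u :: rest) none 3 m rest' (by omega) h0 hng]
        | nil =>
          simp only
          have h2 : ∀ o ∈ u :: rest, pvRank words o = 2 := by
            intro o ho
            have hne1 : pvRank words o ≠ 1 := by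
              intro h1
              have : o ∈ (u :: rest).filter (fun o => pvRank words o = 1) :=
                List.mem_filter.mpr ⟨ho, by simp [h1]⟩
              simp [hng] at this
            have := pvRank_le_two words o
            have := h0 o ho
            omega
          rw [pvFold_rank2 words u rest h2]
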